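-- pv_equiv track=rewrite | github.com/44pie/kitty_logs_parser | httpx_to_csv.py | classify_tech
-- ===== SOURCE A (Python) =====
-- CMS_LIST = {
--     'prestashop':    'PrestaShop',
--     'wordpress':     'WordPress',
--     'woocommerce':   'WooCommerce',
--     'shopify':       'Shopify',
--     'magento':       'Magento',
--     'drupal':        'Drupal',
--     'joomla':        'Joomla',
--     'opencart':      'OpenCart',
--     'wix':           'Wix',
--     'squarespace':   'Squarespace',
--     'bigcommerce':   'BigCommerce',
--     'typo3':         'TYPO3',
--     'contao':        'Contao',
--     'modx':          'MODX',
--     'bitrix':        'Bitrix',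
--     'weebly':        'Weebly',
--     'ghost':         'Ghost',
--     'umbraco':       'Umbraco',
--     'sitecore':      'Sitecore',
--     'oscommerce':    'osCommerce',
--     'zen cart':      'Zen Cart',
--     'cubecart':      'CubeCart',
--     'virtuemart':    'VirtueMart',
--     'ecwid':         'Ecwid',
--     'cs-cart':       'CS-Cart',
--     'x-cart':        'X-Cart',
--     'nopcommerce':   'nopCommerce',
--     'spree':         'Spree',
--     'sylius':        'Sylius',
--     'laravel':       'Laravel',
--     'symfony':       'Symfony',
--     'codeigniter':   'CodeIgniter',
--     'yii':           'Yii',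
--     'django':        'Django',
--     'ruby on rails': 'Ruby on Rails',
-- }
--
-- SERVER_LIST = {
--     'nginx', 'apache', 'litespeed', 'openresty', 'iis', 'caddy',
--     'tomcat', 'gunicorn', 'uvicorn', 'cloudflare', 'cowboy',
--     'pepyaka', 'squarespace', 'lighttpd', 'cherokee', 'jetty',
-- }
--
-- CDN_WAF_LIST = {
--     'cloudflare', 'akamai', 'fastly', 'aws', 'cloudfront', 'imperva',
--     'incapsula', 'sucuri', 'wordfence', 'mod_security', 'f5',
--     'barracuda', 'fortinet', 'azure', 'google cloud', 'bunny cdn',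
--     'stackpath', 'keycdn', 'limelight', 'edgecast',
-- }
--
-- def classify_tech(tech_list: list) -> dict:
--     """Classify technology list into cms/server/cdn/analytics categories.
--     Returns canonical names and versions (without version noise)."""
--     result = {
--         'cms':         '',
--         'cms_version': '',
--         'server':      '',
--         'cdn_waf':     '',
--     }
--
--     for tech in tech_list:
--         parts = tech.split(':', 1)
--         raw_base = parts[0].strip()
--         version   = parts[1].strip() if len(parts) > 1 else ''
--         t_base    = raw_base.lower()
--
--         for keyword, canonical in CMS_LIST.items():
--             if keyword in t_base:
--                 if not result['cms']:
--                     result['cms']         = canonical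
--                     result['cms_version'] = version
--                 break
--         else:
--             for srv in SERVER_LIST:
--                 if srv in t_base:
--                     if not result['server']:
--                         result['server'] = raw_base
--                     break
--             else:
--                 for cdn in CDN_WAF_LIST:
--                     if cdn in t_base:
--                         if not result['cdn_waf']:
--                             result['cdn_waf'] = raw_base
--                         break
--
--     return result
-- ===== SOURCE B (Python) =====
-- # B: no stateful slot-filling pass at all. Each tech is first classified on its own by a
-- # pure function into (category, value, version) tags; the result's three slots are then
-- # filled by three INDEPENDENT "first tagged element of that category" searches over the
-- # tagged list. Correct because in A a slot's final value is exactly the value contributed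
-- # by the first tech whose (unique) category is that slot, and categories are per-tech.
--
-- CMS_LIST = {
--     'prestashop':    'PrestaShop',
--     'wordpress':     'WordPress',
--     'woocommerce':   'WooCommerce',
--     'shopify':       'Shopify',
--     'magento':       'Magento',
--     'drupal':        'Drupal',
--     'joomla':        'Joomla',
--     'opencart':      'OpenCart',
--     'wix':           'Wix',
--     'squarespace':   'Squarespace',
--     'bigcommerce':   'BigCommerce',
--     'typo3':         'TYPO3',
--     'contao':        'Contao',
--     'modx':          'MODX',
--     'bitrix':        'Bitrix',
--     'weebly':        'Weebly',
--     'ghost':         'Ghost',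
--     'umbraco':       'Umbraco',
--     'sitecore':      'Sitecore',
--     'oscommerce':    'osCommerce',
--     'zen cart':      'Zen Cart',
--     'cubecart':      'CubeCart',
--     'virtuemart':    'VirtueMart',
--     'ecwid':         'Ecwid',
--     'cs-cart':       'CS-Cart',
--     'x-cart':        'X-Cart',
--     'nopcommerce':   'nopCommerce',
--     'spree':         'Spree',
--     'sylius':        'Sylius',
--     'laravel':       'Laravel',
--     'symfony':       'Symfony',
--     'codeigniter':   'CodeIgniter',
--     'yii':           'Yii',
--     'django':        'Django',
--     'ruby on rails': 'Ruby on Rails',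
-- }
--
-- SERVER_LIST = {
--     'nginx', 'apache', 'litespeed', 'openresty', 'iis', 'caddy',
--     'tomcat', 'gunicorn', 'uvicorn', 'cloudflare', 'cowboy',
--     'pepyaka', 'squarespace', 'lighttpd', 'cherokee', 'jetty',
-- }
--
-- CDN_WAF_LIST = {
--     'cloudflare', 'akamai', 'fastly', 'aws', 'cloudfront', 'imperva',
--     'incapsula', 'sucuri', 'wordfence', 'mod_security', 'f5',
--     'barracuda', 'fortinet', 'azure', 'google cloud', 'bunny cdn',
--     'stackpath', 'keycdn', 'limelight', 'edgecast',
-- }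
--
--
-- def _categorize(tech):
--     """Pure per-item classification: tag 0 = cms, 1 = server, 2 = cdn_waf, None = no match."""
--     parts = tech.split(':', 1)
--     raw_base = parts[0].strip()
--     t_base = raw_base.lower()
--     for keyword, canonical in CMS_LIST.items():
--         if keyword in t_base:
--             return (0, canonical, parts[1].strip() if len(parts) > 1 else '')
--     if any(srv in t_base for srv in SERVER_LIST):
--         return (1, raw_base, '')
--     if any(cdn in t_base for cdn in CDN_WAF_LIST):
--         return (2, raw_base, '')
--     return None
--
--
-- def classify_tech(tech_list: list) -> dict:
--     tagged = [t for t in map(_categorize, tech_list) if t is not None]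
--     cms = next((t for t in tagged if t[0] == 0), (0, '', ''))
--     server = next((t for t in tagged if t[0] == 1), (1, '', ''))
--     cdn = next((t for t in tagged if t[0] == 2), (2, '', ''))
--     return {'cms': cms[1], 'cms_version': cms[2],
--             'server': server[1], 'cdn_waf': cdn[1]}
-- ===== Notes on version B (the rewrite author's own statement) =====
-- stated objective: alternative
-- what changed: Replaces A's single stateful pass that mutates a 4-slot result dict under three nested for/else loops by a pure per-item classifier mapped over the list producing (category, value, version) tags, followed by three independent first-match searches (next/generator) over the tagged list; there is no accumulator and no slot-emptiness test during traversal.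
import Mathlib
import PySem

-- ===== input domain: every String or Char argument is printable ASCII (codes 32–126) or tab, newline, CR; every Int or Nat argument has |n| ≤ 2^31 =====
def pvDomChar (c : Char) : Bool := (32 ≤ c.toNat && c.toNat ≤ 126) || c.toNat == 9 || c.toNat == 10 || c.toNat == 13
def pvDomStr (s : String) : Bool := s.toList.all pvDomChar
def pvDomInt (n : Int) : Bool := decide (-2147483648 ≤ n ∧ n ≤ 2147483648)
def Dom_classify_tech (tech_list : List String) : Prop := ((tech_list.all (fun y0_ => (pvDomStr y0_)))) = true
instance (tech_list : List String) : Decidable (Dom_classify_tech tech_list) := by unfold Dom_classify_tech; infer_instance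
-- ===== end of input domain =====

-- B replaces A's stateful slot-filling pass (result dict mutated under three nested
-- for/else loops) by a pure per-item classifier mapped over the list plus three
-- independent first-match searches over the tagged list (alternative decomposition, same cost).


-- ===== PORT A =====
def pvCMS : List (String × String) :=
  [("prestashop","PrestaShop"),("wordpress","WordPress"),("woocommerce","WooCommerce"),
   ("shopify","Shopify"),("magento","Magento"),("drupal","Drupal"),("joomla","Joomla"),
   ("opencart","OpenCart"),("wix","Wix"),("squarespace","Squarespace"),
   ("bigcommerce","BigCommerce"),("typo3","TYPO3"),("contao","Contao"),("modx","MODX"),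
   ("bitrix","Bitrix"),("weebly","Weebly"),("ghost","Ghost"),("umbraco","Umbraco"),
   ("sitecore","Sitecore"),("oscommerce","osCommerce"),("zen cart","Zen Cart"),
   ("cubecart","CubeCart"),("virtuemart","VirtueMart"),("ecwid","Ecwid"),
   ("cs-cart","CS-Cart"),("x-cart","X-Cart"),("nopcommerce","nopCommerce"),
   ("spree","Spree"),("sylius","Sylius"),("laravel","Laravel"),("symfony","Symfony"),
   ("codeigniter","CodeIgniter"),("yii","Yii"),("django","Django"),
   ("ruby on rails","Ruby on Rails")]

def pvSERVER : PySem.Set String := PySem.Set.ofList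
  ["nginx","apache","litespeed","openresty","iis","caddy","tomcat","gunicorn","uvicorn",
   "cloudflare","cowboy","pepyaka","squarespace","lighttpd","cherokee","jetty"]

def pvCDN : PySem.Set String := PySem.Set.ofList
  ["cloudflare","akamai","fastly","aws","cloudfront","imperva","incapsula","sucuri",
   "wordfence","mod_security","f5","barracuda","fortinet","azure","google cloud",
   "bunny cdn","stackpath","keycdn","limelight","edgecast"]

-- 'for keyword, canonical in CMS_LIST.items(): if keyword in t_base: …; break / else: …'
-- the break/else decision depends only on the first matching entry, returned here
def pvCmsFind : List (String × String) → List Char → Option String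
  | [], _ => none
  | (kw, canon) :: rest, t =>
      if PySem.Chars.isIn kw.toList t then some canon else pvCmsFind rest t

-- 'for srv in S: if srv in t_base: …; break / else: …' — the value set on a match is
-- raw_base whichever keyword hit, so only first-match existence is returned
def pvSetMatch : List String → List Char → Bool
  | [], _ => false
  | kw :: rest, t =>
      if PySem.Chars.isIn kw.toList t then true else pvSetMatch rest t

def pvStepA (st : PySem.Dict String String) (tech : String) : PySem.Dict String String :=
  let parts := PySem.Chars.splitOnMax tech.toList [':'] 1
  let raw_base := PySem.Chars.strip (parts.headD [])
  let version := if parts.length > 1 then PySem.Chars.strip (parts.getD 1 []) else []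
  let t_base := PySem.Chars.lower raw_base
  match pvCmsFind pvCMS t_base with
  | some canon =>
      if st.getD "cms" "" = "" then
        (st.insert "cms" canon).insert "cms_version" (String.ofList version)
      else st
  | none =>
      if pvSetMatch pvSERVER t_base then
        (if st.getD "server" "" = "" then st.insert "server" (String.ofList raw_base) else st)
      else
        if pvSetMatch pvCDN t_base then
          (if st.getD "cdn_waf" "" = "" then st.insert "cdn_waf" (String.ofList raw_base) else st)
        else st

def pvInitA : PySem.Dict String String :=
  PySem.Dict.ofList [("cms",""),("cms_version",""),("server",""),("cdn_waf","")]

def classify_tech (tech_list : List String) : List (String × String) :=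
  (tech_list.foldl pvStepA pvInitA).items

-- ===== PORT B =====
-- Source B's _categorize: its own CMS loop, then 'any(... in t_base)' over the two sets
def pvCmsLoop : List (String × String) → List Char → Option String
  | [], _ => none
  | (kw, canon) :: rest, t =>
      if PySem.Chars.isIn kw.toList t then some canon else pvCmsLoop rest t

def pvCat (tech : String) : Option (Nat × String × String) :=
  let parts := PySem.Chars.splitOnMax tech.toList [':'] 1
  let raw_base := PySem.Chars.strip (parts.headD [])
  let t_base := PySem.Chars.lower raw_base
  match pvCmsLoop pvCMS t_base with
  | some canonical =>
      some (0, canonical,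
        String.ofList (if parts.length > 1 then PySem.Chars.strip (parts.getD 1 []) else []))
  | none =>
      if pvSERVER.any (fun srv => PySem.Chars.isIn srv.toList t_base) then
        some (1, String.ofList raw_base, "")
      else if pvCDN.any (fun cdn => PySem.Chars.isIn cdn.toList t_base) then
        some (2, String.ofList raw_base, "")
      else none

def classify_tech_alt (tech_list : List String) : List (String × String) :=
  let tagged := (tech_list.map pvCat).filterMap id
  let cms := (tagged.find? (fun t => t.1 == 0)).getD (0, "", "")
  let server := (tagged.find? (fun t => t.1 == 1)).getD (1, "", "")
  let cdn := (tagged.find? (fun t => t.1 == 2)).getD (2, "", "")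
  [("cms", cms.2.1), ("cms_version", cms.2.2), ("server", server.2.1), ("cdn_waf", cdn.2.1)]

-- ===== PRECONDITION & SPEC =====
def Spec_classify_tech (tech_list : List String) (out : List (String × String)) : Prop := out = classify_tech_alt tech_list
instance (tech_list : List String) (out : List (String × String)) : Decidable (Spec_classify_tech tech_list out) := by unfold Spec_classify_tech; infer_instance

-- ===== CLAIM =====
def Claim_equal_classify_tech : Prop := ∀ (tech_list : List String), Dom_classify_tech tech_list → Spec_classify_tech tech_list (classify_tech tech_list)

-- ===== LEMMAS AND PROOFS =====

-- A's dict state, parametrised by its four values (keys never change)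
def pvMkD (c v s w : String) : PySem.Dict String String :=
  PySem.Dict.mk [("cms", c), ("cms_version", v), ("server", s), ("cdn_waf", w)]

-- the tuple-state step induced by B's per-item classifier
def pvStepT (st : String × String × String × String) (tech : String) :
    String × String × String × String :=
  match pvCat tech with
  | none => st
  | some (0, x, ver) => if st.1 = "" then (x, ver, st.2.2.1, st.2.2.2) else st
  | some (1, x, _) => if st.2.2.1 = "" then (st.1, st.2.1, x, st.2.2.2) else st
  | some (_, x, _) => if st.2.2.2 = "" then (st.1, st.2.1, st.2.2.1, x) else st

theorem pvCmsLoop_eq (l : List (String × String)) (t : List Char) :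
    pvCmsLoop l t = pvCmsFind l t := by
  induction l with
  | nil => rfl
  | cons h rest ih => obtain ⟨kw, canon⟩ := h; simp only [pvCmsLoop, pvCmsFind]; split <;> simp [ih]

theorem pvAny_eq_setMatch (l : List String) (t : List Char) :
    l.any (fun s => PySem.Chars.isIn s.toList t) = pvSetMatch l t := by
  induction l with
  | nil => rfl
  | cons kw rest ih => simp only [List.any_cons, pvSetMatch]; split <;> simp_all

theorem pvCat_cases (tech : String) :
    pvCat tech
      = (let parts := PySem.Chars.splitOnMax tech.toList [':'] 1
         let raw_base := PySem.Chars.strip (parts.headD [])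
         let t_base := PySem.Chars.lower raw_base
         match pvCmsFind pvCMS t_base with
         | some canon =>
             some (0, canon,
               String.ofList (if parts.length > 1 then PySem.Chars.strip (parts.getD 1 []) else []))
         | none =>
             if pvSetMatch pvSERVER t_base then some (1, String.ofList raw_base, "")
             else if pvSetMatch pvCDN t_base then some (2, String.ofList raw_base, "")
             else none) := by
  simp only [pvCat, pvCmsLoop_eq, pvAny_eq_setMatch]

-- A's step on the dict is B's induced step on the tuple
theorem pvStep_equiv (c v s w : String) (tech : String) :
    pvStepA (pvMkD c v s w) tech
      = (fun r => pvMkD r.1 r.2.1 r.2.2.1 r.2.2.2) (pvStepT (c, v, s, w) tech) := by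
  simp only [pvStepA, pvStepT, pvCat_cases]
  cases hc : pvCmsFind pvCMS (PySem.Chars.lower (PySem.Chars.strip
      ((PySem.Chars.splitOnMax tech.toList [':'] 1).headD []))) with
  | some canon =>
      by_cases h : c = "" <;>
        simp [pvMkD, PySem.Dict.getD, PySem.Dict.get?, PySem.Dict.insert,
          PySem.Dict.contains, h]
  | none =>
      cases hs : pvSetMatch pvSERVER (PySem.Chars.lower (PySem.Chars.strip
          ((PySem.Chars.splitOnMax tech.toList [':'] 1).headD []))) with
      | true =>
          by_cases h : s = "" <;>
            simp [pvMkD, PySem.Dict.getD, PySem.Dict.get?, PySem.Dict.insert,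
              PySem.Dict.contains, h]
      | false =>
          cases hw : pvSetMatch pvCDN (PySem.Chars.lower (PySem.Chars.strip
              ((PySem.Chars.splitOnMax tech.toList [':'] 1).headD []))) with
          | true =>
              by_cases h : w = "" <;>
                simp [pvMkD, PySem.Dict.getD, PySem.Dict.get?, PySem.Dict.insert,
                  PySem.Dict.contains, h]
          | false => simp [pvMkD]

theorem pvFoldA_eq_foldT (l : List String) (c v s w : String) :
    l.foldl pvStepA (pvMkD c v s w)
      = (fun r => pvMkD r.1 r.2.1 r.2.2.1 r.2.2.2) (l.foldl pvStepT (c, v, s, w)) := by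
  induction l generalizing c v s w with
  | nil => rfl
  | cons tech rest ih =>
      simp only [List.foldl_cons, pvStep_equiv]
      obtain ⟨c', v', s', w'⟩ := pvStepT (c, v, s, w) tech
      exact ih c' v' s' w'

-- values produced by the classifier are never empty (keywords are nonempty, canonicals are nonempty)
theorem pvCmsFind_mem (l : List (String × String)) (t : List Char) (x : String)
    (h : pvCmsFind l t = some x) : ∃ kw, (kw, x) ∈ l := by
  induction l with
  | nil => simp [pvCmsFind] at h
  | cons p rest ih =>
      obtain ⟨kw, canon⟩ := p
      simp only [pvCmsFind] at h
      split at h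
      · injection h with h'; subst h'; exact ⟨kw, by simp⟩
      · obtain ⟨kw', hm⟩ := ih h; exact ⟨kw', List.mem_cons_of_mem _ hm⟩

theorem pvSetMatch_exists (l : List String) (t : List Char)
    (h : pvSetMatch l t = true) : ∃ kw ∈ l, PySem.Chars.isIn kw.toList t = true := by
  induction l with
  | nil => simp [pvSetMatch] at h
  | cons kw rest ih =>
      simp only [pvSetMatch] at h
      split at h
      · exact ⟨kw, List.mem_cons_self .., by assumption⟩
      · obtain ⟨kw', hm, hi⟩ := ih h; exact ⟨kw', List.mem_cons_of_mem _ hm, hi⟩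

-- a nonempty keyword occurring as substring forces the base to be nonempty
theorem pvBase_ne_of_isIn (kw : String) (raw : List Char) (hkw : kw.toList ≠ [])
    (h : PySem.Chars.isIn kw.toList (PySem.Chars.lower raw) = true) :
    String.ofList raw ≠ "" := by
  intro hraw
  have hr : raw = [] := by simpa using congrArg String.toList hraw
  subst hr
  rw [PySem.Chars.isIn_iff_infix] at h
  have hl : PySem.Chars.lower ([] : List Char) = [] := by simp [PySem.Chars.lower]
  rw [hl] at h
  exact hkw (List.sublist_nil.mp h.sublist)

theorem pvCat_val_ne (tech : String) (cat : Nat) (x ver : String)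
    (h : pvCat tech = some (cat, x, ver)) : x ≠ "" := by
  rw [pvCat_cases] at h
  simp only at h
  split at h
  · rename_i canon heq
    simp only [Option.some.injEq, Prod.mk.injEq] at h
    obtain ⟨kw, hm⟩ := pvCmsFind_mem _ _ _ heq
    have hall : ∀ p ∈ pvCMS, p.2 ≠ "" := by decide
    exact h.2.1 ▸ hall _ hm
  · split at h
    · rename_i hs
      simp only [Option.some.injEq, Prod.mk.injEq] at h
      obtain ⟨kw, hm, hi⟩ := pvSetMatch_exists _ _ hs
      have hall : ∀ kw ∈ pvSERVER, kw.toList ≠ [] := by decide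
      exact h.2.1 ▸ pvBase_ne_of_isIn kw _ (hall _ hm) hi
    · split at h
      · rename_i hw
        simp only [Option.some.injEq, Prod.mk.injEq] at h
        obtain ⟨kw, hm, hi⟩ := pvSetMatch_exists _ _ hw
        have hall : ∀ kw ∈ pvCDN, kw.toList ≠ [] := by decide
        exact h.2.1 ▸ pvBase_ne_of_isIn kw _ (hall _ hm) hi
      · simp at h

theorem pvCat_cat (tech : String) (cat : Nat) (x ver : String)
    (h : pvCat tech = some (cat, x, ver)) : cat = 0 ∨ cat = 1 ∨ cat = 2 := by
  rw [pvCat_cases] at h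
  simp only at h
  split at h
  · simp only [Option.some.injEq, Prod.mk.injEq] at h; exact Or.inl h.1.symm
  · split at h
    · simp only [Option.some.injEq, Prod.mk.injEq] at h; exact Or.inr (Or.inl h.1.symm)
    · split at h
      · simp only [Option.some.injEq, Prod.mk.injEq] at h; exact Or.inr (Or.inr h.1.symm)
      · simp at h

-- the tuple fold is computed by B's three independent first-match searches
theorem pvFoldT_finds (l : List String) (c v s w : String) :
    l.foldl pvStepT (c, v, s, w)
      = (let tagged := (l.map pvCat).filterMap id
         ((if c = "" then
             match tagged.find? (fun t => t.1 == 0) with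
             | some t => t.2.1 | none => c
           else c),
          (if c = "" then
             match tagged.find? (fun t => t.1 == 0) with
             | some t => t.2.2 | none => v
           else v),
          (if s = "" then
             match tagged.find? (fun t => t.1 == 1) with
             | some t => t.2.1 | none => s
           else s),
          (if w = "" then
             match tagged.find? (fun t => t.1 == 2) with
             | some t => t.2.1 | none => w
           else w))) := by
  induction l generalizing c v s w with
  | nil => simp
  | cons tech rest ih =>
      simp only [List.foldl_cons, List.map_cons, pvStepT]
      cases hc : pvCat tech with
      | none => simpa using ih c v s w
      | some t =>
          obtain ⟨cat, x, ver⟩ := t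
          have hx : x ≠ "" := pvCat_val_ne tech cat x ver hc
          have hcat : cat = 0 ∨ cat = 1 ∨ cat = 2 := pvCat_cat tech cat x ver hc
          rcases hcat with rfl | rfl | rfl
          · by_cases h : c = "" <;>
              simp [h, ih, hx]
          · by_cases h : s = "" <;>
              simp [h, ih, hx]
          · by_cases h : w = "" <;>
              simp [h, ih, hx]

-- ===== VERDICT =====
theorem classify_tech_spec : Claim_equal_classify_tech := by
  intro tl _
  show classify_tech tl = classify_tech_alt tl
  have hinit : pvInitA = pvMkD "" "" "" "" := by decide
  simp only [classify_tech, classify_tech_alt, hinit, pvFoldA_eq_foldT, pvFoldT_finds]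
  cases h0 : ((tl.map pvCat).filterMap id).find? (fun t => t.1 == 0) <;>
  cases h1 : ((tl.map pvCat).filterMap id).find? (fun t => t.1 == 1) <;>
  cases h2 : ((tl.map pvCat).filterMap id).find? (fun t => t.1 == 2) <;>
    simp [pvMkD]
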